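-- pv_equiv track=rewrite | github.com/symbolic-gpt/symgpt | py/erc/pre.py | extract_interface_blocks
-- ===== SOURCE A (Python) =====
-- def extract_interface_blocks(erc_doc:str):
--     lines = erc_doc.splitlines(keepends=True)
--     spec_start_at = None
--     spec_end_at = len(lines) - 1
--     blocks = []
--
--     solidity_block_start = "```solidity"
--     solidity_block_start_at = None
--     for i, line in enumerate(lines):
--         if spec_start_at is None:
--             if line.find("Specification") != -1:
--                 spec_start_at = i
--             else:
--                 continue
--         if line.startswith("Implementation"):
--             spec_end_at = i - 1
--             break
--
--         if line.find(solidity_block_start) != -1: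
--             solidity_block_start_at = i
--             continue
--         elif line.find("```") != -1:
--             if solidity_block_start_at is not None:
--                 blocks.append(
--                     "".join(lines[solidity_block_start_at+1:i])
--                 )
--                 solidity_block_start_at = None
--             continue
--
--     if len(blocks) == 0:
--         blocks.append("".join(lines[spec_start_at+1:spec_end_at+1]))
--
--     return blocks
-- ===== SOURCE B (Python) =====
-- def extract_interface_blocks(erc_doc: str):
--     lines = erc_doc.splitlines(keepends=True)
--     n = len(lines)
--     # Stage 1: boundaries. spec_start = first line mentioning "Specification" (None if absent);
--     # limit/end from the first "Implementation" line at or after it.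
--     spec_start = next((i for i in range(n) if "Specification" in lines[i]), None)
--     limit, end = n, n - 1
--     blocks = []
--     if spec_start is not None:
--         impl = next((j for j in range(spec_start, n)
--                      if lines[j].startswith("Implementation")), None)
--         if impl is not None:
--             limit, end = impl, impl - 1
--         # Stage 2: index lists of fence lines in the bounded region.
--         opens = [i for i in range(spec_start, limit) if "```solidity" in lines[i]]
--         closes = [i for i in range(spec_start, limit)
--                   if "```" in lines[i] and "```solidity" not in lines[i]]
--         # Stage 3: two-pointer merge — each close pairs with the last unconsumed open before it.
--         k = 0
--         for c in closes:
--             last = None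
--             while k < len(opens) and opens[k] < c:
--                 last = opens[k]
--                 k += 1
--             if last is not None:
--                 blocks.append("".join(lines[last + 1:c]))
--     if not blocks:
--         # raises TypeError when spec_start is None, exactly as the original does
--         blocks.append("".join(lines[spec_start + 1:end + 1]))
--     return blocks
-- ===== Notes on version B (the rewrite author's own statement) =====
-- stated objective: alternative
-- what changed: A interleaves finding the Specification start, the Implementation cutoff and the fenced-block extraction in one stateful loop with a break; B computes the section boundaries first, then builds index lists of opening/closing fence lines in the bounded region and pairs them with a two-pointer merge (each close takes the last unconsumed open before it), with the same fallback.
import Mathlib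
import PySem

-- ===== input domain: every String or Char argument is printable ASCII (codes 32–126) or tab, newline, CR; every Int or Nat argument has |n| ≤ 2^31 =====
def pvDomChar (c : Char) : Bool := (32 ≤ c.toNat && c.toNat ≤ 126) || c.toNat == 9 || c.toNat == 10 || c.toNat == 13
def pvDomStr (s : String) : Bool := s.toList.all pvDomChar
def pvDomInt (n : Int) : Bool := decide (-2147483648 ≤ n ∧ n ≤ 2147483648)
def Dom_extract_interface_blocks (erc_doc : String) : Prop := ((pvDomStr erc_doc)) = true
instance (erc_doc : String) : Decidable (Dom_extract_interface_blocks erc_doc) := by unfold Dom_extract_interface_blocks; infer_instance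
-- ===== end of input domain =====

-- B recomputes the same blocks by a different algorithm/decomposition: boundaries first, then
-- index lists of opening/closing fence lines, paired by a two-pointer merge (objective:
-- alternative; same asymptotic cost as A's single stateful scan).


-- Shared primitive missing from PySem: str.splitlines(keepends=True), ported by hand.
-- Exact on Dom's character set, where the only line boundaries are "\n", "\r\n", "\r".
def pvSplitKeepAux (cur : List Char) : List Char → List (List Char)
  | [] => if cur.isEmpty then [] else [cur.reverse]
  | '\r' :: '\n' :: rest => ('\n' :: '\r' :: cur).reverse :: pvSplitKeepAux [] rest
  | '\n' :: rest => ('\n' :: cur).reverse :: pvSplitKeepAux [] rest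
  | '\r' :: rest => ('\r' :: cur).reverse :: pvSplitKeepAux [] rest
  | c :: rest => pvSplitKeepAux (c :: cur) rest
termination_by cs => cs.length

def pvSplitlinesKeep (s : String) : List String :=
  (pvSplitKeepAux [] s.toList).map String.ofList

-- ===== PORT A =====
-- A's single loop: state (spec_start_at, spec_end_at, solidity_block_start_at, blocks),
-- early `break` modelled by returning the final triple without consuming the rest.
def pvLoopA (lines : List String) : List String → Nat → Option Nat → Int → Option Nat → List String → Option Nat × Int × List String
  | [], _, ss, se, _, bl => (ss, se, bl)
  | line :: rest, i, ss, se, op, bl =>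
    let ss' := match ss with
      | none => if PySem.Str.find line "Specification" ≠ -1 then some i else none
      | some s => some s
    match ss' with
    | none => pvLoopA lines rest (i + 1) none se op bl
    | some s =>
      if PySem.Str.startswith line "Implementation" then (some s, (i : Int) - 1, bl)
      else if PySem.Str.find line "```solidity" ≠ -1 then pvLoopA lines rest (i + 1) (some s) se (some i) bl
      else if PySem.Str.find line "```" ≠ -1 then
        match op with
        | some o => pvLoopA lines rest (i + 1) (some s) se none
            (bl ++ [PySem.Str.join "" (PySem.List.slice lines (some ((o : Int) + 1)) (some (i : Int)))])
        | none => pvLoopA lines rest (i + 1) (some s) se none bl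
      else pvLoopA lines rest (i + 1) (some s) se op bl

def extract_interface_blocks (erc_doc : String) : List String :=
  let lines := pvSplitlinesKeep erc_doc
  match pvLoopA lines lines 0 none ((lines.length : Int) - 1) none [] with
  | (ss, se, blocks) =>
    if blocks.length = 0 then
      match ss with
      | some s => blocks ++ [PySem.Str.join "" (PySem.List.slice lines (some ((s : Int) + 1)) (some (se + 1)))]
      | none => []   -- Python raises TypeError (None + 1) here; excluded by Pre_
    else blocks

-- ===== PORT B =====
-- B stage 3 inner while loop: consume the opens (pointer = dropping a prefix) below close c,
-- remembering the last one consumed.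
def pvTakeLast (c : Nat) : List Nat → Option Nat → Option Nat × List Nat
  | [], last => (last, [])
  | o :: os, last => if o < c then pvTakeLast c os (some o) else (last, o :: os)

-- B stage 3 outer loop over the closes list.
def pvMerge (lines : List String) : List Nat → List Nat → List String → List String
  | _, [], bl => bl
  | opens, c :: cs, bl =>
    match pvTakeLast c opens none with
    | (some l, opens') => pvMerge lines opens' cs
        (bl ++ [PySem.Str.join "" (PySem.List.slice lines (some ((l : Int) + 1)) (some (c : Int)))])
    | (none, opens') => pvMerge lines opens' cs bl

-- lines[i] with 0 ≤ i < len(lines) ported as getD i "" (index always in range where B reads it).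
def extract_interface_blocks_alt (erc_doc : String) : List String :=
  let lines := pvSplitlinesKeep erc_doc
  match lines.findIdx? (fun ln => PySem.Str.isIn "Specification" ln) with
  | none => []   -- Python B raises TypeError in the fallback here; excluded by Pre_
  | some s =>
    let bounds : Nat × Int :=
      match (lines.drop s).findIdx? (fun ln => PySem.Str.startswith ln "Implementation") with
      | some k => (s + k, (s : Int) + (k : Int) - 1)
      | none => (lines.length, (lines.length : Int) - 1)
    let opens := (List.range' s (bounds.1 - s)).filter
      (fun j => PySem.Str.isIn "```solidity" (lines.getD j ""))
    let closes := (List.range' s (bounds.1 - s)).filter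
      (fun j => PySem.Str.isIn "```" (lines.getD j "") && !PySem.Str.isIn "```solidity" (lines.getD j ""))
    let blocks := pvMerge lines opens closes []
    if blocks.isEmpty then
      [PySem.Str.join "" (PySem.List.slice lines (some ((s : Int) + 1)) (some (bounds.2 + 1)))]
    else blocks

-- ===== PRECONDITION & SPEC =====
-- Pre_ excludes exactly the documents that do not contain "Specification":
-- there A (and B) raise TypeError (None + 1) in the fallback, returning no value.
def Pre_extract_interface_blocks (erc_doc : String) : Prop :=
  PySem.Str.isIn "Specification" erc_doc = true
instance (erc_doc : String) : Decidable (Pre_extract_interface_blocks erc_doc) := by unfold Pre_extract_interface_blocks; infer_instance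

def pvWitness_extract_interface_blocks : String :=
  "## Specification\n```solidity\ninterface I {}\n```\nImplementation\n"

def Spec_extract_interface_blocks (erc_doc : String) (out : List String) : Prop := out = extract_interface_blocks_alt erc_doc
instance (erc_doc : String) (out : List String) : Decidable (Spec_extract_interface_blocks erc_doc out) := by unfold Spec_extract_interface_blocks; infer_instance

-- ===== CLAIM (what is proved, stated in full; the proofs are below) =====
def Claim_equal_extract_interface_blocks : Prop := ∀ (erc_doc : String), Dom_extract_interface_blocks erc_doc → Pre_extract_interface_blocks erc_doc → Spec_extract_interface_blocks erc_doc (extract_interface_blocks erc_doc)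

-- ===== LEMMAS AND PROOFS =====

theorem pv_infix_split {α : Type} (sub X Y : List α) (c : α) (hc : c ∉ sub)
    (h : sub <:+: X ++ c :: Y) : sub <:+: X ∨ sub <:+: Y := by
  obtain ⟨s, t, he⟩ := h
  by_cases h1 : s.length + sub.length ≤ X.length
  · left
    have hp : s ++ sub <+: X ++ c :: Y := ⟨t, by simpa [List.append_assoc] using he⟩
    have hp2 : s ++ sub <+: (X ++ c :: Y).take X.length := by
      rw [List.prefix_take_iff]
      exact ⟨hp, by simpa using h1⟩
    rw [List.take_left] at hp2
    exact ⟨s, hp2⟩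
  · have he2 : s ++ (sub ++ t) = X ++ c :: Y := by simpa [List.append_assoc] using he
    by_cases h2 : X.length + 1 ≤ s.length
    · right
      have hd := congrArg (List.drop (X.length + 1)) he2
      rw [List.drop_append_of_le_length (by omega)] at hd
      have hy : List.drop (X.length + 1) (X ++ c :: Y) = Y := by
        rw [show X ++ c :: Y = (X ++ [c]) ++ Y from by simp]
        rw [show (X.length + 1) = (X ++ [c]).length from by simp, List.drop_left]
      rw [hy] at hd
      rw [← List.append_assoc] at hd
      exact ⟨s.drop (X.length + 1), t, hd⟩
    · exfalso
      apply hc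
      have hn1 : s.length ≤ X.length := by omega
      have hlen : X.length < (s ++ (sub ++ t)).length := by
        rw [he2]; simp
      have hel := List.getElem_of_eq he2 hlen
      rw [List.getElem_append_right hn1] at hel
      rw [List.getElem_append_left (by simp at hlen ⊢; omega)] at hel
      rw [List.getElem_append_right (le_refl _)] at hel
      simp only [Nat.sub_self, List.getElem_cons_zero] at hel
      rw [← hel]
      exact List.getElem_mem _

theorem pvSplit_no_spec (sub : List Char) (hn : ('\n') ∉ sub) (hr : ('\r') ∉ sub) (hne : sub ≠ []) :
    ∀ (cur cs : List Char), (∀ ln ∈ pvSplitKeepAux cur cs, PySem.Chars.isIn sub ln = false) →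
    ¬ sub <:+: (cur.reverse ++ cs) := by
  intro cur cs
  fun_induction pvSplitKeepAux cur cs with
  | case1 cur =>
    rename_i hcur
    intro _ hinf
    have hc0 : cur = [] := by simpa using hcur
    subst hc0
    simp at hinf
    exact hne hinf
  | case2 =>
    rename_i cur hcur
    intro h hinf
    have h0 := h cur.reverse (List.mem_cons_self ..)
    rw [PySem.Chars.isIn_eq_false_iff] at h0
    rw [List.append_nil] at hinf
    exact h0 hinf
  | case3 cur rest ih =>
    intro h hinf
    have h0 : ¬ sub <:+: cur.reverse ++ ['\r', '\n'] := by
      have := h _ (List.mem_cons_self ..)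
      rw [PySem.Chars.isIn_eq_false_iff] at this
      simpa [List.append_assoc] using this
    have hrest : ¬ sub <:+: rest := by
      have := ih (fun ln hln => h _ (List.mem_cons_of_mem _ hln))
      simpa using this
    rcases pv_infix_split sub cur.reverse ('\n' :: rest) '\r' hr hinf with h1 | h1
    · exact h0 (h1.trans ⟨[], ['\r', '\n'], by simp⟩)
    · rcases pv_infix_split sub [] rest '\n' hn (by simpa using h1) with h2 | h2
      · exact hne (by simpa using h2)
      · exact hrest h2
  | case4 cur rest ih =>
    intro h hinf
    have h0 : ¬ sub <:+: cur.reverse ++ ['\n'] := by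
      have := h _ (List.mem_cons_self ..)
      rw [PySem.Chars.isIn_eq_false_iff] at this
      simpa [List.append_assoc] using this
    have hrest : ¬ sub <:+: rest := by
      have := ih (fun ln hln => h _ (List.mem_cons_of_mem _ hln))
      simpa using this
    rcases pv_infix_split sub cur.reverse rest '\n' hn hinf with h1 | h1
    · exact h0 (h1.trans ⟨[], ['\n'], by simp⟩)
    · exact hrest h1
  | case5 cur rest hnr ih =>
    intro h hinf
    have h0 : ¬ sub <:+: cur.reverse ++ ['\r'] := by
      have := h _ (List.mem_cons_self ..)
      rw [PySem.Chars.isIn_eq_false_iff] at this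
      simpa [List.append_assoc] using this
    have hrest : ¬ sub <:+: rest := by
      have := ih (fun ln hln => h _ (List.mem_cons_of_mem _ hln))
      simpa using this
    rcases pv_infix_split sub cur.reverse rest '\r' hr hinf with h1 | h1
    · exact h0 (h1.trans ⟨[], ['\r'], by simp⟩)
    · exact hrest h1
  | case6 cur c rest h1 h2 h3 ih =>
    intro h
    have := ih h
    rw [List.reverse_cons, List.append_assoc] at this
    simpa using this

-- 'sub in s' (B's test) and 's.find(sub) != -1' (A's test) agree.
theorem pv_isIn_iff_find (sub s : String) :
    PySem.Str.isIn sub s = true ↔ PySem.Str.find s sub ≠ -1 := by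
  rw [PySem.Str.isIn_iff_infix, PySem.Str.find_ne_neg_one_iff]

-- Proof-side intermediate: the fence scan A's loop performs after "Specification" was found,
-- freed of the Implementation test (the scan list is already bounded).
def pvScanB (lines : List String) : List String → Nat → Option Nat → List String → List String
  | [], _, _, bl => bl
  | ln :: rest, i, op, bl =>
    if PySem.Str.isIn "```solidity" ln then pvScanB lines rest (i + 1) (some i) bl
    else
      match op with
      | some o =>
        if PySem.Str.isIn "```" ln then
          pvScanB lines rest (i + 1) none
            (bl ++ [PySem.Str.join "" (PySem.List.slice lines (some ((o : Int) + 1)) (some (i : Int)))])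
        else pvScanB lines rest (i + 1) (some o) bl
      | none => pvScanB lines rest (i + 1) none bl

-- A's loop skips a clean prefix (no "Specification") without touching its state.
theorem pvLoopA_skip (lines : List String) (pre : List String)
    (h : ∀ ln ∈ pre, PySem.Str.isIn "Specification" ln = false) :
    ∀ (rest : List String) (i : Nat) (se : Int) (op : Option Nat) (bl : List String),
    pvLoopA lines (pre ++ rest) i none se op bl = pvLoopA lines rest (i + pre.length) none se op bl := by
  induction pre with
  | nil => intro rest i se op bl; simp
  | cons ln pre ih =>
    intro rest i se op bl
    have hln : PySem.Str.isIn "Specification" ln = false := h ln (by simp)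
    have hfind : ¬ PySem.Str.find ln "Specification" ≠ -1 := by
      intro hc
      have := (pv_isIn_iff_find _ _).mpr hc
      rw [hln] at this
      exact Bool.false_ne_true this
    rw [List.cons_append]
    simp only [pvLoopA]
    rw [if_neg hfind]
    rw [ih (fun l hl => h l (by simp [hl])) rest (i + 1) se op bl]
    have e : i + 1 + pre.length = i + (ln :: pre).length := by simp; omega
    rw [e]

-- Once the head contains "Specification", running with spec_start = none equals
-- running with spec_start = some i (the fall-through in A's loop body).
theorem pvLoopA_enter (lines : List String) (ln : String) (rest : List String)
    (i : Nat) (se : Int) (op : Option Nat) (bl : List String)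
    (h : PySem.Str.isIn "Specification" ln = true) :
    pvLoopA lines (ln :: rest) i none se op bl = pvLoopA lines (ln :: rest) i (some i) se op bl := by
  have hfind : PySem.Str.find ln "Specification" ≠ -1 := (pv_isIn_iff_find _ _).mp h
  simp only [pvLoopA]
  rw [if_pos hfind]

-- A's loop from spec_start onward = boundary search + bounded fence scan.
theorem pvLoopA_phase2 (lines : List String) :
    ∀ (rem : List String) (i s : Nat) (se : Int) (op : Option Nat) (bl : List String),
    pvLoopA lines rem i (some s) se op bl =
      match rem.findIdx? (fun ln => PySem.Str.startswith ln "Implementation") with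
      | some k => (some s, (i : Int) + (k : Int) - 1, pvScanB lines (rem.take k) i op bl)
      | none => (some s, se, pvScanB lines rem i op bl) := by
  intro rem
  induction rem with
  | nil => intro i s se op bl; simp [pvLoopA, pvScanB]
  | cons ln rest ih =>
    intro i s se op bl
    have ecast : ∀ (a b : Nat), ((a + 1 : Nat) : Int) + (b : Int) - 1 = (a : Int) + ((b + 1 : Nat) : Int) - 1 := by
      intro a b; push_cast; ring
    rw [List.findIdx?_cons]
    simp only [pvLoopA]
    by_cases himp : PySem.Str.startswith ln "Implementation" = true
    · rw [if_pos himp, if_pos himp]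
      simp only [List.take_zero, pvScanB]
      norm_num
    · have himpC : PySem.Str.startswith ln "Implementation" = false := by
        cases hx : PySem.Str.startswith ln "Implementation" with
        | false => rfl
        | true => exact absurd hx himp
      rw [if_neg himp, if_neg himp]
      by_cases hsol : PySem.Str.isIn "```solidity" ln = true
      · rw [if_pos ((pv_isIn_iff_find _ _).mp hsol), ih (i + 1) s se (some i) bl]
        cases hidx : rest.findIdx? (fun ln => PySem.Str.startswith ln "Implementation") with
        | none =>
          simp only [Option.map_none, pvScanB]
          rw [if_pos hsol]
        | some k =>
          simp only [Option.map_some, List.take_succ_cons, pvScanB]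
          rw [if_pos hsol, ecast i k]
      · have hsolC : PySem.Str.isIn "```solidity" ln = false := by
          cases hx : PySem.Str.isIn "```solidity" ln with
          | false => rfl
          | true => exact absurd hx hsol
        have hfsol : ¬ PySem.Str.find ln "```solidity" ≠ -1 := by
          intro hc
          have := (pv_isIn_iff_find _ _).mpr hc
          rw [hsolC] at this
          exact Bool.false_ne_true this
        rw [if_neg hfsol]
        by_cases hbt : PySem.Str.isIn "```" ln = true
        · rw [if_pos ((pv_isIn_iff_find _ _).mp hbt)]
          cases op with
          | some o =>
            dsimp only
            rw [ih (i + 1) s se none]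
            cases hidx : rest.findIdx? (fun ln => PySem.Str.startswith ln "Implementation") with
            | none =>
              simp only [Option.map_none, pvScanB]
              rw [if_neg (by rw [hsolC]; exact Bool.false_ne_true), if_pos hbt]
            | some k =>
              simp only [Option.map_some, List.take_succ_cons, pvScanB]
              rw [if_neg (by rw [hsolC]; exact Bool.false_ne_true), if_pos hbt, ecast i k]
          | none =>
            dsimp only
            rw [ih (i + 1) s se none]
            cases hidx : rest.findIdx? (fun ln => PySem.Str.startswith ln "Implementation") with
            | none =>
              simp only [Option.map_none, pvScanB]
              rw [if_neg (by rw [hsolC]; exact Bool.false_ne_true)]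
            | some k =>
              simp only [Option.map_some, List.take_succ_cons, pvScanB]
              rw [if_neg (by rw [hsolC]; exact Bool.false_ne_true), ecast i k]
        · have hbtC : PySem.Str.isIn "```" ln = false := by
            cases hx : PySem.Str.isIn "```" ln with
            | false => rfl
            | true => exact absurd hx hbt
          have hfbt : ¬ PySem.Str.find ln "```" ≠ -1 := by
            intro hc
            have := (pv_isIn_iff_find _ _).mpr hc
            rw [hbtC] at this
            exact Bool.false_ne_true this
          rw [if_neg hfbt]
          rw [ih (i + 1) s se op]
          cases hidx : rest.findIdx? (fun ln => PySem.Str.startswith ln "Implementation") with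
          | none =>
            simp only [Option.map_none, pvScanB]
            rw [if_neg (by rw [hsolC]; exact Bool.false_ne_true)]
            cases op with
            | some o =>
              dsimp only
              rw [if_neg (by rw [hbtC]; exact Bool.false_ne_true)]
            | none => rfl
          | some k =>
            simp only [Option.map_some, List.take_succ_cons, pvScanB]
            rw [if_neg (by rw [hsolC]; exact Bool.false_ne_true)]
            cases op with
            | some o =>
              dsimp only
              rw [if_neg (by rw [hbtC]; exact Bool.false_ne_true), ecast i k]
            | none =>
              rw [ecast i k]

-- The while loop over P ++ Q with every P-element below c and no Q-element below c
-- consumes exactly P, remembering P's last element.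
theorem pvTakeLast_split (c : Nat) (P Q : List Nat) (acc : Option Nat)
    (hP : ∀ x ∈ P, x < c) (hQ : ∀ x ∈ Q, ¬ x < c) :
    pvTakeLast c (P ++ Q) acc = (P.getLast?.or acc, Q) := by
  induction P generalizing acc with
  | nil =>
    cases Q with
    | nil => simp [pvTakeLast]
    | cons q qs =>
      simp only [List.nil_append, pvTakeLast]
      rw [if_neg (hQ q (by simp))]
      simp
  | cons p ps ih =>
    simp only [List.cons_append, pvTakeLast]
    rw [if_pos (hP p (by simp))]
    rw [ih (some p) (fun x hx => hP x (by simp [hx]))]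
    cases hps : ps.getLast? with
    | none =>
      have : ps = [] := by simpa using hps
      subst this; simp
    | some x =>
      have : (p :: ps).getLast? = some x := by
        rw [List.getLast?_cons, hps]; simp
      simp [this]

-- KEY LEMMA: the stateful fence scan over the region lines[i:i+m] equals the two-pointer
-- merge of the open/close index lists of that region.  P carries the not-yet-consumed opens
-- (all below i, last one = the scan's open state).
theorem pvScan_merge (lines : List String) :
    ∀ (m i : Nat) (op : Option Nat) (bl : List String) (P : List Nat),
    (∀ x ∈ P, x < i) →
    (op = none → P = []) →
    (∀ o, op = some o → P.getLast? = some o) →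
    pvScanB lines ((lines.drop i).take m) i op bl =
      pvMerge lines
        (P ++ (List.range' i m).filter (fun j => PySem.Str.isIn "```solidity" (lines.getD j "")))
        ((List.range' i m).filter (fun j => PySem.Str.isIn "```" (lines.getD j "") && !PySem.Str.isIn "```solidity" (lines.getD j ""))) bl := by
  intro m
  induction m with
  | zero =>
    intro i op bl P _ _ _
    simp [pvScanB, pvMerge]
  | succ m ih =>
    intro i op bl P hP hnone hsome
    by_cases hi : i < lines.length
    · have hdrop : lines.drop i = lines[i] :: lines.drop (i + 1) := (List.getElem_cons_drop hi).symm
      have hgetD : lines.getD i "" = lines[i] := List.getD_eq_getElem lines "" hi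
      rw [hdrop, List.take_succ_cons, List.range'_succ, List.filter_cons, List.filter_cons]
      by_cases hsol : PySem.Str.isIn "```solidity" lines[i] = true
      · simp only [pvScanB, hgetD, hsol, Bool.not_true, Bool.and_false,
          if_true, Bool.false_eq_true, if_false]
        rw [ih (i + 1) (some i) bl (P ++ [i])
          (by intro x hx; rcases List.mem_append.mp hx with h | h
              · exact Nat.lt_succ_of_lt (hP x h)
              · simp at h; omega)
          (by intro h; cases h)
          (by intro o h; injection h with h; subst h; simp)]
        rw [List.append_assoc]
        rfl
      · have hsolC : PySem.Str.isIn "```solidity" lines[i] = false := by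
          cases hx : PySem.Str.isIn "```solidity" lines[i] with
          | false => rfl
          | true => exact absurd hx hsol
        by_cases hbt : PySem.Str.isIn "```" lines[i] = true
        · -- close line
          have hQ : ∀ x ∈ (List.range' (i + 1) m).filter
              (fun j => PySem.Str.isIn "```solidity" (lines.getD j "")), ¬ x < i := by
            intro x hx
            have := List.mem_range'_1.mp (List.mem_of_mem_filter hx)
            omega
          simp only [pvScanB, hgetD, hsolC, hbt, Bool.not_false, Bool.and_true,
            if_true, Bool.false_eq_true, if_false]
          cases hop : op with
          | some o =>
            have hlast : P.getLast? = some o := hsome o hop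
            simp only [pvMerge, pvTakeLast_split i P _ none hP hQ, hlast, Option.or]
            exact ih (i + 1) none _ [] (by simp) (fun _ => rfl) (by intro o h; cases h)
          | none =>
            have hP0 : P = [] := hnone hop
            subst hP0
            have htl : pvTakeLast i ((List.range' (i + 1) m).filter
                (fun j => PySem.Str.isIn "```solidity" (lines.getD j ""))) none
                = (none, (List.range' (i + 1) m).filter
                    (fun j => PySem.Str.isIn "```solidity" (lines.getD j ""))) := by
              simpa using pvTakeLast_split i [] _ none (by simp) hQ
            simp only [pvMerge]
            rw [List.nil_append, htl]
            exact ih (i + 1) none bl [] (by simp) (fun _ => rfl) (by intro o h; cases h)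
        · have hbtC : PySem.Str.isIn "```" lines[i] = false := by
            cases hx : PySem.Str.isIn "```" lines[i] with
            | false => rfl
            | true => exact absurd hx hbt
          simp only [pvScanB, hgetD, hsolC, hbtC, Bool.false_and,
            Bool.false_eq_true, if_false]
          cases hop : op with
          | some o =>
            exact ih (i + 1) (some o) bl P (fun x hx => Nat.lt_succ_of_lt (hP x hx))
              (by intro h; cases h) (fun o' h => hsome o' (hop.trans h))
          | none =>
            exact ih (i + 1) none bl P (fun x hx => Nat.lt_succ_of_lt (hP x hx))
              (fun _ => hnone hop) (by intro o h; cases h)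
    · -- i past the end: region empty, both filters empty ("" contains no fence)
      have hdrop : lines.drop i = [] := List.drop_eq_nil_of_le (by omega)
      have hfo : (List.range' i (m + 1)).filter
          (fun j => PySem.Str.isIn "```solidity" (lines.getD j "")) = [] := by
        rw [List.filter_eq_nil_iff]
        intro j hj
        have hji := (List.mem_range'_1.mp hj).1
        rw [List.getD_eq_default lines "" (by omega)]
        decide
      have hfc : (List.range' i (m + 1)).filter
          (fun j => PySem.Str.isIn "```" (lines.getD j "") && !PySem.Str.isIn "```solidity" (lines.getD j "")) = [] := by
        rw [List.filter_eq_nil_iff]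
        intro j hj
        have hji := (List.mem_range'_1.mp hj).1
        rw [List.getD_eq_default lines "" (by omega)]
        decide
      rw [hdrop, hfo, hfc]
      simp [pvScanB, pvMerge]

-- ===== VERDICT (by name: the statement is the Claim_ definition above) =====
theorem extract_interface_blocks_spec : Claim_equal_extract_interface_blocks := by
  intro erc_doc _ hpre
  unfold Spec_extract_interface_blocks
  unfold Pre_extract_interface_blocks at hpre
  simp only [extract_interface_blocks, extract_interface_blocks_alt]
  set lines := pvSplitlinesKeep erc_doc with hlines
  cases hfs : lines.findIdx? (fun ln => PySem.Str.isIn "Specification" ln) with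
  | none =>
    exfalso
    rw [List.findIdx?_eq_none_iff] at hfs
    have hall : ∀ ln ∈ pvSplitKeepAux [] erc_doc.toList, PySem.Chars.isIn "Specification".toList ln = false := by
      intro ln hln
      have hmem : String.ofList ln ∈ lines := by
        rw [hlines]
        exact List.mem_map_of_mem hln
      have := hfs _ hmem
      simpa using this
    have hno := pvSplit_no_spec "Specification".toList (by decide) (by decide) (by decide) [] erc_doc.toList hall
    rw [List.reverse_nil, List.nil_append] at hno
    exact hno ((PySem.Str.isIn_iff_infix _ _).mp hpre)
  | some s =>
    rw [List.findIdx?_eq_some_iff_getElem] at hfs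
    obtain ⟨hs, hps, hmin⟩ := hfs
    have hclean : ∀ ln ∈ lines.take s, PySem.Str.isIn "Specification" ln = false := by
      intro ln hln
      rw [List.mem_take_iff_getElem] at hln
      obtain ⟨j, hj, rfl⟩ := hln
      have := hmin j (lt_of_lt_of_le hj (min_le_left _ _))
      simpa using this
    have e1 : 0 + (List.take s lines).length = s := by
      simp [List.length_take, Nat.min_eq_left hs.le]
    have h1 : pvLoopA lines lines 0 none ((lines.length : Int) - 1) none []
            = pvLoopA lines (lines.drop s) s none ((lines.length : Int) - 1) none [] := by
      conv_lhs => rw [← List.take_append_drop s lines]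
      rw [pvLoopA_skip _ _ hclean, List.take_append_drop, e1]
    have h2 : lines.drop s = lines[s] :: lines.drop (s + 1) := (List.getElem_cons_drop hs).symm
    have h3 : pvLoopA lines (lines.drop s) s none ((lines.length : Int) - 1) none []
            = pvLoopA lines (lines.drop s) s (some s) ((lines.length : Int) - 1) none [] := by
      rw [h2]
      exact pvLoopA_enter lines _ _ s _ none [] hps
    rw [h1, h3, pvLoopA_phase2]
    cases hidx : (lines.drop s).findIdx? (fun ln => PySem.Str.startswith ln "Implementation") with
    | some k =>
      simp only [hidx]
      have hksub : s + k - s = k := by omega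
      have hscan : pvScanB lines ((lines.drop s).take k) s none []
          = pvMerge lines
              ((List.range' s k).filter (fun j => PySem.Str.isIn "```solidity" (lines.getD j "")))
              ((List.range' s k).filter (fun j => PySem.Str.isIn "```" (lines.getD j "") && !PySem.Str.isIn "```solidity" (lines.getD j ""))) [] := by
        have := pvScan_merge lines k s none [] [] (by simp) (fun _ => rfl) (by intro o h; cases h)
        simpa using this
      simp only [hscan, hksub]
      cases hbl : pvMerge lines
          ((List.range' s k).filter (fun j => PySem.Str.isIn "```solidity" (lines.getD j "")))
          ((List.range' s k).filter (fun j => PySem.Str.isIn "```" (lines.getD j "") && !PySem.Str.isIn "```solidity" (lines.getD j ""))) [] with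
      | nil => simp
      | cons b bs => simp
    | none =>
      simp only [hidx]
      have hreg : lines.drop s = (lines.drop s).take (lines.length - s) := by
        rw [← List.length_drop, List.take_length]
      have hscan : pvScanB lines (lines.drop s) s none []
          = pvMerge lines
              ((List.range' s (lines.length - s)).filter (fun j => PySem.Str.isIn "```solidity" (lines.getD j "")))
              ((List.range' s (lines.length - s)).filter (fun j => PySem.Str.isIn "```" (lines.getD j "") && !PySem.Str.isIn "```solidity" (lines.getD j ""))) [] := by
        rw [hreg]
        have := pvScan_merge lines (lines.length - s) s none [] [] (by simp) (fun _ => rfl) (by intro o h; cases h)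
        simpa using this
      simp only [hscan]
      cases hbl : pvMerge lines
          ((List.range' s (lines.length - s)).filter (fun j => PySem.Str.isIn "```solidity" (lines.getD j "")))
          ((List.range' s (lines.length - s)).filter (fun j => PySem.Str.isIn "```" (lines.getD j "") && !PySem.Str.isIn "```solidity" (lines.getD j ""))) [] with
      | nil => simp
      | cons b bs => simp
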